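-- pv_equiv track=rewrite | github.com/sunnydays15/c-practice2 | baekjoon/Python/16. 스택, 큐, 덱/p12789.py | checking_space
-- ===== SOURCE A (Python) =====
-- def checking_space(line, space, num):
--     try:
--         if space[-1] == line:
--             space.pop()
--             line += 1
--             return checking_space(line, space, num)
--
--         else:
--             space.append(num)
--             return line
--     except:
--         space.append(num)
--         return line
-- ===== SOURCE B (Python) =====
-- def checking_space(line, space, num):
--     # Count the run at the top of the stack matching line, line+1, ...,
--     # then truncate once and append; returns the same value as A.
--     k = 0
--     for x in reversed(space):
--         if x != line + k:
--             break
--         k += 1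
--     del space[len(space) - k:]
--     space.append(num)
--     return line + k
-- ===== Notes on version B (the rewrite author's own statement) =====
-- stated objective: alternative
-- what changed: Replaces A's try/except recursion with pop-per-step by a single scan over reversed(space) that counts the matching run line, line+1, ..., followed by one slice deletion and the append; no recursion and no exception handling.
import Mathlib
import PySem

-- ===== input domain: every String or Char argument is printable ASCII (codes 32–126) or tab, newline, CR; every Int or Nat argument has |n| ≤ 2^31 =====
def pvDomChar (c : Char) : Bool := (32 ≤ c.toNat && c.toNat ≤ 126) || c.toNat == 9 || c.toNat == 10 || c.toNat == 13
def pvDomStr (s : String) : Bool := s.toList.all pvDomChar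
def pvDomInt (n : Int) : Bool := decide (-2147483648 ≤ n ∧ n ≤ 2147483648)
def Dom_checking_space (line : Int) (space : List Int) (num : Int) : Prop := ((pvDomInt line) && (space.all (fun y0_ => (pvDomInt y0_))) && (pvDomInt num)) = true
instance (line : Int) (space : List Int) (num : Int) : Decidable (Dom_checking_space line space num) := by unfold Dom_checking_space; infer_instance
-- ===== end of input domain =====

-- B replaces A's try/except recursion by a single counted scan over the reversed stack;
-- equivalence is about the RETURN value only (both Pythons mutate `space` identically).


-- ===== PORT A =====
-- A: recursion popping the top of the stack while space[-1] == line; IndexError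
-- (empty stack, pyGet? = none) falls into the except branch and returns line.
def checking_space (line : Int) (space : List Int) (num : Int) : Int :=
  match h : PySem.List.pyGet? space (-1) with
  | some x =>
      if x = line then checking_space (line + 1) space.dropLast num
      else line
  | none => line
termination_by space.length
decreasing_by
  have hne : space ≠ [] := by
    intro he; subst he; simp [PySem.List.pyGet?_neg_one] at h
  cases space with
  | nil => exact absurd rfl hne
  | cons a l => simp [List.length_dropLast]

-- ===== PORT B =====
-- B helper: the for-loop over reversed(space) with counter k and early break.
def csRun (line : Int) (rev : List Int) (k : Int) : Int :=
  match rev with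
  | [] => k
  | x :: rest => if x ≠ line + k then k else csRun line rest (k + 1)

def checking_space_alt (line : Int) (space : List Int) (num : Int) : Int :=
  line + csRun line space.reverse 0

-- ===== PRECONDITION & SPEC =====
def Spec_checking_space (line : Int) (space : List Int) (num : Int) (out : Int) : Prop := out = checking_space_alt line space num
instance (line : Int) (space : List Int) (num : Int) (out : Int) : Decidable (Spec_checking_space line space num out) := by unfold Spec_checking_space; infer_instance

-- ===== CLAIM (what is proved, stated in full; the proofs are below) =====
def Claim_equal_checking_space : Prop := ∀ (line : Int) (space : List Int) (num : Int), Dom_checking_space line space num → Spec_checking_space line space num (checking_space line space num)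

-- ===== LEMMAS AND PROOFS =====

-- shifting the accumulator of B's loop by one step
theorem csRun_shift (line : Int) (rev : List Int) (k : Int) :
    csRun line rev (k + 1) = csRun (line + 1) rev k + 1 := by
  induction rev generalizing k with
  | nil => simp [csRun]
  | cons x rest ih =>
      simp only [csRun]
      have : (line + (k + 1)) = (line + 1 + k) := by ring
      rw [this]
      split_ifs with hx
      · rfl
      · exact ih (k + 1)

theorem checking_space_eq_alt (rev : List Int) (line num : Int) :
    checking_space line rev.reverse num = line + csRun line rev 0 := by
  induction rev generalizing line with
  | nil =>
      rw [checking_space]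
      split
      case _ x' h => simp [PySem.List.pyGet?_neg_one] at h
      case _ h => simp [csRun]
  | cons x rest ih =>
      have hget : PySem.List.pyGet? (x :: rest).reverse (-1) = some x := by
        simp [List.reverse_cons, PySem.List.pyGet?_neg_one_append_singleton]
      have hdrop : (x :: rest).reverse.dropLast = rest.reverse := by
        simp [List.reverse_cons]
      rw [checking_space]
      split
      case _ x' h =>
        rw [hget] at h
        cases h
        by_cases hx : x = line
        · subst hx
          rw [if_pos rfl, hdrop, ih (x + 1)]
          simp only [csRun, add_zero, ne_eq, not_true_eq_false, if_false]
          have hs := csRun_shift x rest 0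
          simp only [zero_add] at hs ⊢
          rw [hs]
          ring
        · rw [if_neg hx]
          simp only [csRun, add_zero, ne_eq]
          rw [if_pos hx]
          ring
      case _ h =>
        rw [hget] at h
        exact absurd h (by simp)

-- ===== VERDICT (by name: the statement is the Claim_ definition above) =====
theorem checking_space_spec : Claim_equal_checking_space := by
  intro line space num _
  unfold Spec_checking_space checking_space_alt
  have := checking_space_eq_alt space.reverse line num
  simpa using this
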